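-- pv_equiv track=rewrite | github.com/JerryC0820/Auto-ALL_for-Ai | 牛马神器_v4.0.13.py | _pick_update_asset
-- ===== SOURCE A (Python) =====
-- UPDATE_PRODUCT_KEY = "niuma_shenqi"
--
-- def _pick_update_asset(assets):
--     if not assets:
--         return None
--     candidates = []
--     for asset in assets:
--         name = (asset.get("name") or "").lower()
--         if not name.endswith("_package.zip"):
--             continue
--         score = 0
--         if UPDATE_PRODUCT_KEY in name:
--             score += 2
--         candidates.append((score, asset))
--     if not candidates:
--         return None
--     candidates.sort(key=lambda x: x[0], reverse=True)
--     return candidates[0][1]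
-- ===== SOURCE B (Python) =====
-- UPDATE_PRODUCT_KEY = "niuma_shenqi"
--
-- def _pick_update_asset(assets):
--     best = None  # (score, asset) of the best candidate seen so far
--     for asset in assets or []:
--         name = (asset.get("name") or "").lower()
--         if not name.endswith("_package.zip"):
--             continue
--         score = 2 if UPDATE_PRODUCT_KEY in name else 0
--         if best is None or score > best[0]:
--             best = (score, asset)
--     return best[1] if best is not None else None
-- ===== Notes on version B (the rewrite author's own statement) =====
-- stated objective: simpler
-- what changed: Replaced the collect-then-stable-sort-then-take-head pipeline with a single pass keeping the best (score, asset) seen so far, updating only on strictly greater score so the first of equal-scoring assets wins exactly as the stable sort did.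
import Mathlib
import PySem

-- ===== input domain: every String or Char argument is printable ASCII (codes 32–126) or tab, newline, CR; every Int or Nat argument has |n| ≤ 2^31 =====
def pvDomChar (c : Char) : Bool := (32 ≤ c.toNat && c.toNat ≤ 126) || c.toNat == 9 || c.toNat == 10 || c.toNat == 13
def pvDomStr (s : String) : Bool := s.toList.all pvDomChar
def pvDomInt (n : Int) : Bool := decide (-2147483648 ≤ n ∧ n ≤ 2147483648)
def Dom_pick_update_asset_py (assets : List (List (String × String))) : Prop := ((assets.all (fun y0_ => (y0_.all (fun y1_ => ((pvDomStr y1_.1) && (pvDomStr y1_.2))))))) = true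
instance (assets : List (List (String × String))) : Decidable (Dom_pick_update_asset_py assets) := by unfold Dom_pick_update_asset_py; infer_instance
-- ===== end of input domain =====

-- B replaces A's collect/stable-sort/head pipeline with a single best-so-far pass (simpler; return value only).


-- ===== PORT A =====
-- the candidate test/score shared by both ports (same module-level constants in both Pythons)
def pvName (asset : List (String × String)) : List Char :=
  PySem.Chars.lower ((PySem.Dict.get? (PySem.Dict.mk asset) "name").getD "").toList

def pvCand (asset : List (String × String)) : Option (Int × List (String × String)) :=
  let name := pvName asset
  if PySem.Chars.endswith name "_package.zip".toList then
    some ((if PySem.Chars.isIn "niuma_shenqi".toList name then (0 : Int) + 2 else 0), asset)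
  else none

def pick_update_asset_py (assets : List (List (String × String))) : Option (List (String × String)) :=
  if assets = [] then none
  else
    let candidates := assets.foldl (fun cs asset =>
      match pvCand asset with
      | none => cs
      | some c => cs ++ [c]) []
    if candidates = [] then none
    else
      ((PySem.List.sorted candidates (fun x => x.1) true).head?).map (fun c => c.2)

-- ===== PORT B =====
def pvStep (best : Option (Int × List (String × String))) (c : Int × List (String × String)) :
    Option (Int × List (String × String)) :=
  match best with
  | none => some c
  | some b => if b.1 < c.1 then some c else some b

def pick_update_asset_py_alt (assets : List (List (String × String))) : Option (List (String × String)) :=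
  (assets.foldl (fun best asset =>
      match pvCand asset with
      | none => best
      | some c => pvStep best c) none).map (fun b => b.2)

-- ===== PRECONDITION & SPEC =====
def Spec_pick_update_asset_py (assets : List (List (String × String))) (out : Option (List (String × String))) : Prop := out = pick_update_asset_py_alt assets
instance (assets : List (List (String × String))) (out : Option (List (String × String))) : Decidable (Spec_pick_update_asset_py assets out) := by unfold Spec_pick_update_asset_py; infer_instance

-- ===== CLAIM (what is proved, stated in full; the proofs are below) =====
def Claim_equal_pick_update_asset_py : Prop := ∀ (assets : List (List (String × String))), Dom_pick_update_asset_py assets → Spec_pick_update_asset_py assets (pick_update_asset_py assets)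

-- ===== LEMMAS AND PROOFS =====

-- A's append-accumulator loop builds init ++ the filterMap of the candidate function.
theorem pvFoldl_append (assets : List (List (String × String)))
    (init : List (Int × List (String × String))) :
    assets.foldl (fun cs asset =>
      match pvCand asset with
      | none => cs
      | some c => cs ++ [c]) init = init ++ assets.filterMap pvCand := by
  induction assets generalizing init with
  | nil => simp
  | cons a t ih =>
    cases h : pvCand a <;> simp [List.foldl_cons, h, ih]

-- B's loop over assets is the best-so-far fold over the same candidate list.
theorem pvFoldl_filterMap (assets : List (List (String × String)))
    (b0 : Option (Int × List (String × String))) :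
    assets.foldl (fun best asset =>
      match pvCand asset with
      | none => best
      | some c => pvStep best c) b0 = (assets.filterMap pvCand).foldl pvStep b0 := by
  induction assets generalizing b0 with
  | nil => rfl
  | cons a t ih =>
    cases h : pvCand a <;> simp [List.foldl_cons, h, ih]

-- head of a descending stable insertion = the strict-greater running best
theorem pvHead_insertBy (x : Int × List (String × String))
    (acc : List (Int × List (String × String))) :
    (PySem.List.insertBy (fun a b => decide (b.1 < a.1)) x acc).head? =
      pvStep acc.head? x := by
  cases acc with
  | nil => rfl
  | cons y ys =>
    simp only [PySem.List.insertBy, pvStep, List.head?]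
    by_cases h : y.1 < x.1 <;> simp [h]

theorem pvHead_foldl (cs : List (Int × List (String × String)))
    (acc : List (Int × List (String × String))) :
    (cs.foldl (fun acc x => PySem.List.insertBy (fun a b => decide (b.1 < a.1)) x acc) acc).head? =
      cs.foldl pvStep acc.head? := by
  induction cs generalizing acc with
  | nil => rfl
  | cons c t ih => simp [List.foldl_cons, ih, pvHead_insertBy]

theorem pvHead_sorted (cs : List (Int × List (String × String))) :
    (PySem.List.sorted cs (fun x => x.1) true).head? = cs.foldl pvStep none := by
  rw [PySem.List.sorted_rev_eq_foldl_insertBy]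
  simpa using pvHead_foldl cs []

-- ===== VERDICT (by name: the statement is the Claim_ definition above) =====
theorem pick_update_asset_py_spec : Claim_equal_pick_update_asset_py := by
  intro assets _
  unfold Spec_pick_update_asset_py pick_update_asset_py pick_update_asset_py_alt
  rw [pvFoldl_filterMap]
  by_cases hne : assets = []
  · simp [hne]
  · simp only [hne, if_false, pvFoldl_append, List.nil_append]
    by_cases hc : assets.filterMap pvCand = []
    · simp [hc]
    · simp only [hc, if_false, pvHead_sorted]
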